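-- pv_equiv track=rewrite | github.com/kaluginpeter/Algorithms_and_structures_tasks | CodeWars/6kyu/Minimum_difference_in_duplicate_characters.py | min_repeating_character_difference
-- ===== SOURCE A (Python) =====
-- def min_repeating_character_difference(text):
--     hashmap: dict[str, int] = dict()
--     main_diff: int = float('inf')
--     main_char: str = ''
--     for idx in range(len(text)):
--         if text[idx] in hashmap:
--             if idx - hashmap[text[idx]] < main_diff:
--                 main_diff = idx - hashmap[text[idx]]
--                 main_char = text[idx]
--         hashmap[text[idx]] = idx
--     return (main_diff, main_char) if main_char else None
-- ===== SOURCE B (Python) =====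
-- def min_repeating_character_difference(text):
--     positions = {}
--     for i, ch in enumerate(text):
--         positions.setdefault(ch, []).append(i)
--     best = None  # (diff, second_index, char)
--     for ch, idxs in positions.items():
--         for i, j in zip(idxs, idxs[1:]):
--             if best is None or (j - i, j) < (best[0], best[1]):
--                 best = (j - i, j, ch)
--     return (best[0], best[2]) if best is not None else None
-- ===== Notes on version B (the rewrite author's own statement) =====
-- stated objective: alternative
-- what changed: A's single scan that maintains a last-occurrence hashmap and a running strict-< minimum is replaced by a two-phase grouping algorithm: first build a dict mapping each character to the ordered list of all its indices, then pick the lexicographically minimal (gap, second_index) candidate over consecutive index pairs of each group.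
import Mathlib
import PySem

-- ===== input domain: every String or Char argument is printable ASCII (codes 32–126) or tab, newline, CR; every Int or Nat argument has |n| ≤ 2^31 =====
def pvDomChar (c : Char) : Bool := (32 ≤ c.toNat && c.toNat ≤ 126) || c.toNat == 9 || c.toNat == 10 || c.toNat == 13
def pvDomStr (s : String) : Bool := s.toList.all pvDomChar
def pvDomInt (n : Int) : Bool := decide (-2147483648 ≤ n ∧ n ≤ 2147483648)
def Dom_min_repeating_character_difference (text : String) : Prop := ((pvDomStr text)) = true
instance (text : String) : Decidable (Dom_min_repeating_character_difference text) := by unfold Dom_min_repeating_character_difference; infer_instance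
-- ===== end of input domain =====

-- B replaces A's one-pass last-occurrence scan by a grouping pass (char ↦ all its indices)
-- followed by a lex-min choice over consecutive index pairs; objective: alternative structure, same result.

-- ===== PORT A =====
-- A's loop state is (hashmap, main_diff, main_char); the float('inf')/'' "no duplicate yet"
-- sentinel pair is represented as `none`, a set best (main_diff, main_char) as `some (diff, char)`.
def pvStepA (d : PySem.Dict Char Int) (best : Option (Int × Char)) (p : Int × Char) :
    PySem.Dict Char Int × Option (Int × Char) :=
  match d.get? p.2 with                                   -- if text[idx] in hashmap
  | some prev =>
    match best with
    | none => (d.insert p.2 p.1, some (p.1 - prev, p.2))  -- idx - hashmap[...] < inf : always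
    | some (bd, bc) =>
      (d.insert p.2 p.1,
        if p.1 - prev < bd then some (p.1 - prev, p.2) else some (bd, bc))
  | none => (d.insert p.2 p.1, best)

def min_repeating_character_difference (text : String) : Option (Int × String) :=
  -- for idx in range(len(text)): ... text[idx] — ported as a fold over the enumerated characters
  let st := (PySem.List.enumerate text.toList 0).foldl
      (fun s p => pvStepA s.1 s.2 p) (PySem.Dict.empty, none)
  -- return (main_diff, main_char) if main_char else None
  st.2.map (fun q => (q.1, String.ofList [q.2]))

-- ===== PORT B =====
-- best is (diff, second_index, char); comparison is Python's tuple-lex (j - i, j) < (best[0], best[1])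
def pvLStep (b : Option (Int × Int × Char)) (c : Int × Int × Char) : Option (Int × Int × Char) :=
  match b with
  | none => some c
  | some (bd, bj, bc) =>
    if c.1 < bd ∨ (c.1 = bd ∧ c.2.1 < bj) then some c else some (bd, bj, bc)

def min_repeating_character_difference_alt (text : String) : Option (Int × String) :=
  -- positions.setdefault(ch, []).append(i)
  let positions := (PySem.List.enumerate text.toList 0).foldl
      (fun d p => d.modify p.2 [] (fun l => l ++ [p.1])) PySem.Dict.empty
  -- for ch, idxs in positions.items(): for i, j in zip(idxs, idxs[1:]): ...
  let best := positions.items.foldl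
      (fun b q => (q.2.zip q.2.tail).foldl
        (fun b ij => pvLStep b (ij.2 - ij.1, ij.2, q.1)) b) none
  best.map (fun b => (b.1, String.ofList [b.2.2]))

-- ===== PRECONDITION & SPEC =====
def Spec_min_repeating_character_difference (text : String) (out : Option (Int × String)) : Prop := out = min_repeating_character_difference_alt text
instance (text : String) (out : Option (Int × String)) : Decidable (Spec_min_repeating_character_difference text out) := by unfold Spec_min_repeating_character_difference; infer_instance

-- ===== CLAIM (what is proved, stated in full; the proofs are below) =====
def Claim_equal_min_repeating_character_difference : Prop := ∀ (text : String), Dom_min_repeating_character_difference text → Spec_min_repeating_character_difference text (min_repeating_character_difference text)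

-- ===== LEMMAS AND PROOFS =====

-- the candidate stream of A's scan: one candidate (gap, second index, char) per repeated position
def pvCand (d : PySem.Dict Char Int) : List (Int × Char) → List (Int × Int × Char)
  | [] => []
  | p :: rest =>
    (match d.get? p.2 with
     | some prev => [(p.1 - prev, p.1, p.2)]
     | none => []) ++ pvCand (d.insert p.2 p.1) rest

def pvIns (d : PySem.Dict Char Int) (p : Int × Char) : PySem.Dict Char Int := d.insert p.2 p.1

def pvPos (D : PySem.Dict Char (List Int)) (xs : List (Int × Char)) : PySem.Dict Char (List Int) :=
  xs.foldl (fun d p => d.modify p.2 [] (fun l => l ++ [p.1])) D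

def pvPairs (ps : List Int) (c : Char) : List (Int × Int × Char) :=
  (ps.zip ps.tail).map (fun ij => (ij.2 - ij.1, ij.2, c))

def pvCandB (xs : List (Int × Char)) : List (Int × Int × Char) :=
  (pvPos PySem.Dict.empty xs).items.flatMap (fun q => pvPairs q.2 q.1)

def pvLMin (b : Option (Int × Int × Char)) (l : List (Int × Int × Char)) : Option (Int × Int × Char) :=
  l.foldl pvLStep b

def pvDrop (c : Int × Int × Char) : Int × Char := (c.1, c.2.2)

theorem pvModify_eq (d : PySem.Dict Char (List Int)) (k : Char) (f : List Int → List Int) :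
    d.modify k [] f = d.insert k (f (d.getD k [])) := rfl

-- A's fold equals the lex-min fold over its candidate stream
theorem pvLemA (xs : List (Int × Char)) :
    ∀ (d : PySem.Dict Char Int) (b : Option (Int × Int × Char)),
    xs.Pairwise (fun p q => p.1 < q.1) →
    (∀ bd bj bc, b = some (bd, bj, bc) → ∀ p ∈ xs, bj < p.1) →
    (xs.foldl (fun s p => pvStepA s.1 s.2 p) (d, b.map pvDrop)).2
      = (pvLMin b (pvCand d xs)).map pvDrop := by
  induction xs with
  | nil => intro d b _ _; simp [pvCand, pvLMin]
  | cons p rest ih =>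
    intro d b hpw hb
    obtain ⟨j, c⟩ := p
    rw [List.foldl_cons]
    cases hget : d.get? c with
    | none =>
      have hstep : pvStepA d (b.map pvDrop) (j, c) = (d.insert c j, b.map pvDrop) := by
        simp [pvStepA, hget]
      rw [hstep]
      have := ih (d.insert c j) b hpw.tail (fun bd bj bc h p hp => hb bd bj bc h p (List.mem_cons_of_mem _ hp))
      rw [this]
      simp [pvCand, hget]
    | some prev =>
      have hcand : pvCand d ((j, c) :: rest) = (j - prev, j, c) :: pvCand (d.insert c j) rest := by
        simp [pvCand, hget]
      rw [hcand]
      have hlm : pvLMin b ((j - prev, j, c) :: pvCand (d.insert c j) rest)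
          = pvLMin (pvLStep b (j - prev, j, c)) (pvCand (d.insert c j) rest) := rfl
      rw [hlm]
      cases b with
      | none =>
        have hstep : pvStepA d ((none : Option (Int × Int × Char)).map pvDrop) (j, c)
            = (d.insert c j, (some (j - prev, j, c)).map pvDrop) := by
          simp [pvStepA, hget, pvDrop]
        have hb' : ∀ bd bj bc, (some (j - prev, j, c) : Option (Int × Int × Char)) = some (bd, bj, bc) → ∀ p ∈ rest, bj < p.1 := by
          rintro bd bj bc heq p hp
          cases heq
          exact List.rel_of_pairwise_cons hpw hp
        rw [hstep, ih (d.insert c j) (some (j - prev, j, c)) hpw.tail hb']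
        rfl
      | some t =>
        obtain ⟨bd, bj, bc⟩ := t
        have hbj : bj < j := hb bd bj bc rfl (j, c) (List.mem_cons_self)
        by_cases hlt : j - prev < bd
        · have hstep : pvStepA d ((some (bd, bj, bc)).map pvDrop) (j, c)
              = (d.insert c j, (some (j - prev, j, c)).map pvDrop) := by
            simp [pvStepA, hget, pvDrop, hlt]
          have hls : pvLStep (some (bd, bj, bc)) (j - prev, j, c) = some (j - prev, j, c) := by
            simp [pvLStep, hlt]
          have hb' : ∀ bd' bj' bc', (some (j - prev, j, c) : Option (Int × Int × Char)) = some (bd', bj', bc') → ∀ p ∈ rest, bj' < p.1 := by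
            rintro bd' bj' bc' heq p hp
            cases heq
            exact List.rel_of_pairwise_cons hpw hp
          rw [hstep, hls, ih (d.insert c j) (some (j - prev, j, c)) hpw.tail hb']
        · have hstep : pvStepA d ((some (bd, bj, bc)).map pvDrop) (j, c)
              = (d.insert c j, (some (bd, bj, bc)).map pvDrop) := by
            simp [pvStepA, hget, pvDrop, hlt]
          have hls : pvLStep (some (bd, bj, bc)) (j - prev, j, c) = some (bd, bj, bc) := by
            have : ¬ (j - prev < bd ∨ (j - prev = bd ∧ j < bj)) := by omega
            simp [pvLStep, this]
          have hb' : ∀ bd' bj' bc', (some (bd, bj, bc) : Option (Int × Int × Char)) = some (bd', bj', bc') → ∀ p ∈ rest, bj' < p.1 := by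
            rintro bd' bj' bc' heq p hp
            cases heq
            exact hb bd bj bc rfl p (List.mem_cons_of_mem _ hp)
          rw [hstep, hls, ih (d.insert c j) (some (bd, bj, bc)) hpw.tail hb']

-- candidate stream splits over appends
theorem pvCand_append (xs ys : List (Int × Char)) :
    ∀ d, pvCand d (xs ++ ys) = pvCand d xs ++ pvCand (xs.foldl pvIns d) ys := by
  induction xs with
  | nil => intro d; simp [pvCand]
  | cons p rest ih =>
    intro d
    simp only [List.cons_append, pvCand, List.foldl_cons, ih, pvIns, List.append_assoc]

-- last-occurrence dict of A = last element of the filtered index list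
theorem pvScan_get (xs : List (Int × Char)) :
    ∀ (d : PySem.Dict Char Int) (c : Char),
    (xs.foldl pvIns d).get? c
      = (((xs.filter (fun p => p.2 == c)).map (fun p => p.1)).getLast?).or (d.get? c) := by
  induction xs with
  | nil => intro d c; simp
  | cons p rest ih =>
    intro d c
    rw [List.foldl_cons]
    by_cases hc : p.2 = c
    · subst hc
      have h1 : (pvIns d p).get? p.2 = some p.1 := PySem.Dict.get?_insert_self d p.2 p.1
      rw [ih (pvIns d p) p.2, h1]
      simp only [List.filter_cons, beq_self_eq_true, if_pos, List.map_cons]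
      rw [show (p.1 :: (rest.filter (fun q => q.2 == p.2)).map (fun q => q.1))
            = [p.1] ++ (rest.filter (fun q => q.2 == p.2)).map (fun q => q.1) from rfl,
          List.getLast?_append]
      simp
    · have h1 : (pvIns d p).get? c = d.get? c := by
        unfold pvIns
        rw [PySem.Dict.get?_insert]
        exact if_neg (fun h => hc h.symm)
      rw [ih (pvIns d p) c, h1]
      have : (p.2 == c) = false := beq_false_of_ne hc
      simp [this]

-- positions dict of B = the filtered index list
theorem pvPos_getD (xs : List (Int × Char)) (c : Char) :
    (pvPos PySem.Dict.empty xs).getD c []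
      = (xs.filter (fun p => p.2 == c)).map (fun p => p.1) := by
  have h : pvPos PySem.Dict.empty xs
      = (xs.map (fun p => (p.2, p.1))).foldl
          (fun d p => d.modify p.1 [] (fun l => l ++ [p.2])) PySem.Dict.empty := by
    rw [List.foldl_map]; rfl
  rw [h, PySem.Dict.getD_foldl_modify_append]
  simp [List.filter_map, List.map_map, Function.comp_def]

theorem pvPos_keys_nodup (xs : List (Int × Char)) :
    ∀ (D : PySem.Dict Char (List Int)), D.keys.Nodup → (pvPos D xs).keys.Nodup := by
  induction xs with
  | nil => intro D h; exact h
  | cons p rest ih =>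
    intro D h
    rw [show pvPos D (p :: rest) = pvPos (D.modify p.2 [] (fun l => l ++ [p.1])) rest from rfl]
    exact ih _ (by rw [pvModify_eq]; exact PySem.Dict.nodup_keys_insert D _ _ h)

-- zip-pairs of a list with one element appended
theorem pvPairs_concat (ps : List Int) (j : Int) (c : Char) :
    pvPairs (ps ++ [j]) c
      = pvPairs ps c ++ (match ps.getLast? with
          | some a => [(j - a, j, c)]
          | none => []) := by
  induction ps with
  | nil => simp [pvPairs]
  | cons a t ih =>
    cases t with
    | nil => simp [pvPairs]
    | cons b t' =>
      have h1 : pvPairs ((a :: b :: t') ++ [j]) c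
          = (b - a, b, c) :: pvPairs ((b :: t') ++ [j]) c := by
        simp [pvPairs]
      have h2 : pvPairs (a :: b :: t') c = (b - a, b, c) :: pvPairs (b :: t') c := by
        simp [pvPairs]
      rw [h1, ih, h2]
      simp

-- the grouping pass produces a permutation of A's candidate stream
theorem pvPerm (xs : List (Int × Char)) : (pvCand PySem.Dict.empty xs).Perm (pvCandB xs) := by
  induction xs using List.reverseRecOn with
  | nil => simp [pvCand, pvCandB, pvPos, PySem.Dict.empty]
  | append_singleton xs p ih =>
    obtain ⟨j, c⟩ := p
    set m : List Int := (xs.filter (fun p => p.2 == c)).map (fun p => p.1) with hm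
    -- A side
    have hA : pvCand PySem.Dict.empty (xs ++ [(j, c)])
        = pvCand PySem.Dict.empty xs ++ (match m.getLast? with
            | some a => [(j - a, j, c)]
            | none => []) := by
      rw [pvCand_append]
      have hg : (xs.foldl pvIns PySem.Dict.empty).get? c = m.getLast? := by
        rw [pvScan_get]; simp [hm]
      cases hlast : m.getLast? with
      | none => simp [pvCand, hg, hlast]
      | some a => simp [pvCand, hg, hlast]
    -- B side
    have hPos : pvPos PySem.Dict.empty (xs ++ [(j, c)])
        = (pvPos PySem.Dict.empty xs).insert c (m ++ [j]) := by
      rw [show pvPos PySem.Dict.empty (xs ++ [(j, c)])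
            = pvPos (pvPos PySem.Dict.empty xs) [(j, c)] from (List.foldl_append ..),
          show pvPos (pvPos PySem.Dict.empty xs) [(j, c)]
            = (pvPos PySem.Dict.empty xs).modify c [] (fun l => l ++ [j]) from rfl,
          pvModify_eq, pvPos_getD]
    have hnodup : (pvPos PySem.Dict.empty xs).keys.Nodup :=
      pvPos_keys_nodup xs PySem.Dict.empty (by simp [PySem.Dict.keys, PySem.Dict.empty])
    by_cases hcont : (pvPos PySem.Dict.empty xs).contains c = true
    · -- c already grouped: its list m is extended in place
      have hget : (pvPos PySem.Dict.empty xs).get? c = some m := by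
        have hs := PySem.Dict.contains_eq_isSome_get? (d := pvPos PySem.Dict.empty xs) (k := c)
        rw [hcont] at hs
        cases hg : (pvPos PySem.Dict.empty xs).get? c with
        | none => rw [hg] at hs; simp at hs
        | some v =>
          have hgd := pvPos_getD xs c
          rw [PySem.Dict.getD_eq_get?_getD, hg] at hgd
          simp only [Option.getD_some] at hgd
          rw [hgd, hm]
      obtain ⟨s, t, hst⟩ := List.append_of_mem (PySem.Dict.mem_items_of_get?_eq_some _ hget)
      have hkeys : ((pvPos PySem.Dict.empty xs).items.map Prod.fst).Nodup := hnodup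
      rw [hst] at hkeys
      have hns : c ∉ s.map Prod.fst ∧ c ∉ t.map Prod.fst := by
        simp only [List.map_append, List.map_cons, List.nodup_append, List.nodup_cons] at hkeys
        obtain ⟨h1, ⟨h2, h3⟩, h4⟩ := hkeys
        exact ⟨fun hmem => h4 c hmem c (List.mem_cons_self) rfl, h2⟩
      have hcnotin : (∀ q ∈ s, (q.1 == c) = false) ∧ (∀ q ∈ t, (q.1 == c) = false) :=
        ⟨fun q hq => beq_false_of_ne (fun h => hns.1 (h ▸ List.mem_map_of_mem hq)),
         fun q hq => beq_false_of_ne (fun h => hns.2 (h ▸ List.mem_map_of_mem hq))⟩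
      have hitems' : (pvPos PySem.Dict.empty (xs ++ [(j, c)])).items
          = s ++ (c, m ++ [j]) :: t := by
        rw [hPos, PySem.Dict.items_insert, if_pos hcont, hst, List.map_append, List.map_cons]
        have h1 : s.map (fun p => if p.1 == c then (c, m ++ [j]) else p) = s := by
          rw [List.map_congr_left (g := id) (fun q hq => by simp [hcnotin.1 q hq]), List.map_id]
        have h2 : t.map (fun p => if p.1 == c then (c, m ++ [j]) else p) = t := by
          rw [List.map_congr_left (g := id) (fun q hq => by simp [hcnotin.2 q hq]), List.map_id]
        rw [h1, h2]
        simp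
      have hB : pvCandB (xs ++ [(j, c)])
          = s.flatMap (fun q => pvPairs q.2 q.1) ++ (pvPairs m c ++ (match m.getLast? with
              | some a => [(j - a, j, c)]
              | none => [])) ++ t.flatMap (fun q => pvPairs q.2 q.1) := by
        unfold pvCandB
        rw [hitems']
        simp [List.flatMap_append, pvPairs_concat]
      have hBold : pvCandB xs
          = s.flatMap (fun q => pvPairs q.2 q.1) ++ pvPairs m c
              ++ t.flatMap (fun q => pvPairs q.2 q.1) := by
        unfold pvCandB
        rw [hst]
        simp [List.flatMap_append]
      rw [hA, hB]
      refine ((ih.append_right _).trans ?_)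
      rw [hBold]
      have hperm : ((s.flatMap (fun q => pvPairs q.2 q.1) ++ pvPairs m c
            ++ t.flatMap (fun q => pvPairs q.2 q.1)) ++ (match m.getLast? with
            | some a => [(j - a, j, c)] | none => [])).Perm
          (s.flatMap (fun q => pvPairs q.2 q.1) ++ (pvPairs m c ++ (match m.getLast? with
            | some a => [(j - a, j, c)] | none => [])) ++ t.flatMap (fun q => pvPairs q.2 q.1)) := by
        simp only [List.append_assoc]
        exact List.Perm.append_left _ (List.Perm.append_left _ List.perm_append_comm)
      exact hperm
    · -- fresh char: appended group is a singleton, no new candidate on either side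
      have hcf : (pvPos PySem.Dict.empty xs).contains c = false := by
        simp only [Bool.not_eq_true] at hcont; exact hcont
      have hm0 : m = [] := by
        have h := pvPos_getD xs c
        rw [PySem.Dict.getD_of_not_contains _ _ hcf] at h
        rw [hm, ← h]
      have hB : pvCandB (xs ++ [(j, c)]) = pvCandB xs := by
        unfold pvCandB
        rw [hPos, PySem.Dict.items_insert, if_neg hcont, hm0]
        simp [List.flatMap_append, pvPairs]
      rw [hA, hB, hm0]
      simpa using ih

-- the second-index components of A's candidates form a sublist of the scanned indices
theorem pvCand_js_sublist (xs : List (Int × Char)) :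
    ∀ d, List.Sublist ((pvCand d xs).map (fun c => c.2.1)) (xs.map (fun p => p.1)) := by
  induction xs with
  | nil => intro d; simp [pvCand]
  | cons p rest ih =>
    intro d
    cases hget : d.get? p.2 with
    | none =>
      have : pvCand d (p :: rest) = pvCand (d.insert p.2 p.1) rest := by simp [pvCand, hget]
      rw [this, List.map_cons]
      exact (ih _).cons _
    | some prev =>
      have : pvCand d (p :: rest) = (p.1 - prev, p.1, p.2) :: pvCand (d.insert p.2 p.1) rest := by
        simp [pvCand, hget]
      rw [this, List.map_cons, List.map_cons]
      exact (ih _).cons₂ _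

-- the lex-min step is commutative on any list whose second-index keys are distinct
theorem pvComm {l : List (Int × Int × Char)}
    (hnd : (l.map (fun c => c.2.1)).Nodup) :
    ∀ x ∈ l, ∀ y ∈ l, ∀ z, pvLStep (pvLStep z x) y = pvLStep (pvLStep z y) x := by
  intro x hx y hy z
  by_cases hxy : x = y
  · subst hxy; rfl
  · have hne : x.2.1 ≠ y.2.1 := by
      intro h
      exact hxy (List.inj_on_of_nodup_map hnd hx hy h)
    obtain ⟨x1, xj, xc⟩ := x
    obtain ⟨y1, yj, yc⟩ := y
    simp only at hne
    cases z with
    | none =>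
      by_cases h3 : (y1 < x1 ∨ (y1 = x1 ∧ yj < xj)) <;>
        by_cases h4 : (x1 < y1 ∨ (x1 = y1 ∧ xj < yj)) <;>
        simp only [pvLStep, h3, h4, if_pos, if_neg, not_false_iff] <;>
        first | rfl | (exfalso; omega)
    | some b =>
      obtain ⟨bd, bj, bc⟩ := b
      by_cases h1 : (x1 < bd ∨ (x1 = bd ∧ xj < bj)) <;>
        by_cases h2 : (y1 < bd ∨ (y1 = bd ∧ yj < bj)) <;>
        by_cases h3 : (y1 < x1 ∨ (y1 = x1 ∧ yj < xj)) <;>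
        by_cases h4 : (x1 < y1 ∨ (x1 = y1 ∧ xj < yj)) <;>
        simp only [pvLStep, h1, h2, h3, h4, if_pos, if_neg, not_false_iff] <;>
        first | rfl | (exfalso; omega)

-- B's nested fold is the lex-min fold over the flattened candidate list
theorem pvLemB (xs : List (Int × Char)) :
    (pvPos PySem.Dict.empty xs).items.foldl
        (fun b q => (q.2.zip q.2.tail).foldl
          (fun b ij => pvLStep b (ij.2 - ij.1, ij.2, q.1)) b) none
      = pvLMin none (pvCandB xs) := by
  unfold pvLMin pvCandB
  rw [List.foldl_flatMap]
  have hfun : (fun (b : Option (Int × Int × Char)) (q : Char × List Int) =>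
        (q.2.zip q.2.tail).foldl (fun b ij => pvLStep b (ij.2 - ij.1, ij.2, q.1)) b)
      = (fun acc q => (pvPairs q.2 q.1).foldl pvLStep acc) := by
    funext b q
    unfold pvPairs
    rw [List.foldl_map]
  rw [hfun]

-- ===== VERDICT (by name: the statement is the Claim_ definition above) =====
theorem min_repeating_character_difference_spec : Claim_equal_min_repeating_character_difference := by
  intro text _
  unfold Spec_min_repeating_character_difference
  unfold min_repeating_character_difference min_repeating_character_difference_alt
  simp only
  set xs := PySem.List.enumerate text.toList 0 with hxs
  have hpw : xs.Pairwise (fun p q => p.1 < q.1) := PySem.List.pairwise_lt_enumerate _ _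
  have hA := pvLemA xs PySem.Dict.empty none hpw (by intro _ _ _ h; cases h)
  rw [show ((none : Option (Int × Int × Char)).map pvDrop) = none from rfl] at hA
  rw [hA]
  have hB : List.foldl (fun d p => d.modify p.2 [] fun l => l ++ [p.1]) PySem.Dict.empty xs
      = pvPos PySem.Dict.empty xs := rfl
  rw [hB, pvLemB]
  have hnd : ((pvCand PySem.Dict.empty xs).map (fun c => c.2.1)).Nodup := by
    have hsub := pvCand_js_sublist xs PySem.Dict.empty
    have : (xs.map (fun p => p.1)).Nodup := by
      have hplt : (xs.map (fun p => p.1)).Pairwise (· < ·) := List.pairwise_map.mpr hpw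
      exact hplt.imp ne_of_lt
    exact this.sublist hsub
  have heq : pvLMin none (pvCand PySem.Dict.empty xs) = pvLMin none (pvCandB xs) :=
    (pvPerm xs).foldl_eq' (pvComm hnd) none
  rw [heq, Option.map_map]
  rfl
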